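-- pv_equiv track=rewrite | github.com/Yospy/Agents-using-Composio-MCP-tools | tools.py | canonicalize_toolkits
-- ===== SOURCE A (Python) =====
-- TOOLKIT_SYNONYMS: dict[str, list[str]] = {
--     "GMAIL": ["GMAIL", "GOOGLE_GMAIL"],
--     "GITHUB": ["GITHUB"],
--     # Correct slug is GOOGLEDOCS; include older variants as fallbacks
--     "GOOGLEDOCS": [
--         "GOOGLEDOCS",
--         "GOOGLE_DOCS",
--         "GOOGLE_DOCUMENTS",
--         "GOOGLE_DOC",
--         "DOCS",
--         "GOOGLE_DRIVE",  # Some Docs actions may be surfaced under Drive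
--         "GOOGLE",
--     ],
--     # Backward-compatibility: if older records still use GOOGLE_DOCS, try the same aliases
--     "GOOGLE_DOCS": [
--         "GOOGLEDOCS",
--         "GOOGLE_DOCS",
--         "GOOGLE_DOCUMENTS",
--         "GOOGLE_DOC",
--         "DOCS",
--         "GOOGLE_DRIVE",
--         "GOOGLE",
--     ],
--     # Google Calendar synonyms
--     "GOOGLECALENDAR": [
--         "GOOGLECALENDAR",
--         "GOOGLE_CALENDAR",
--         "CALENDAR",
--     ],
--     # Notion synonyms across environments
--     "NOTION": [
--         "NOTION",
--         "NOTIONHQ",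
--         "NOTION_DB",
--         "NOTIONDATABASES",
--         "NOTION_DATABASE",
--         "NOTIONDATABASE",
--         "NOTION_PAGES",
--         "NOTIONPAGES",
--     ],
-- }
--
-- def canonicalize_toolkit_slug(slug: str) -> str:
--     up = slug.upper()
--     for canonical, aliases in TOOLKIT_SYNONYMS.items():
--         if up == canonical or up in {a.upper() for a in aliases}:
--             return canonical
--     return up
--
-- def canonicalize_toolkits(slugs: list[str]) -> list[str]:
--     seen: set[str] = set()
--     result: list[str] = []
--     for s in slugs:
--         can = canonicalize_toolkit_slug(s)
--         if can not in seen: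
--             seen.add(can)
--             result.append(can)
--     return result
-- ===== SOURCE B (Python) =====
-- TOOLKIT_SYNONYMS: dict[str, list[str]] = {
--     "GMAIL": ["GMAIL", "GOOGLE_GMAIL"],
--     "GITHUB": ["GITHUB"],
--     "GOOGLEDOCS": [
--         "GOOGLEDOCS",
--         "GOOGLE_DOCS",
--         "GOOGLE_DOCUMENTS",
--         "GOOGLE_DOC",
--         "DOCS",
--         "GOOGLE_DRIVE",
--         "GOOGLE",
--     ],
--     "GOOGLE_DOCS": [
--         "GOOGLEDOCS",
--         "GOOGLE_DOCS",
--         "GOOGLE_DOCUMENTS",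
--         "GOOGLE_DOC",
--         "DOCS",
--         "GOOGLE_DRIVE",
--         "GOOGLE",
--     ],
--     "GOOGLECALENDAR": [
--         "GOOGLECALENDAR",
--         "GOOGLE_CALENDAR",
--         "CALENDAR",
--     ],
--     "NOTION": [
--         "NOTION",
--         "NOTIONHQ",
--         "NOTION_DB",
--         "NOTIONDATABASES",
--         "NOTION_DATABASE",
--         "NOTIONDATABASE",
--         "NOTION_PAGES",
--         "NOTIONPAGES",
--     ],
-- }
--
-- # Reverse table built once: first canonical wins on overlapping aliases (setdefault).
-- _ALIAS_TO_CANONICAL: dict[str, str] = {}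
-- for _canonical, _aliases in TOOLKIT_SYNONYMS.items():
--     for _a in [_canonical] + _aliases:
--         _ALIAS_TO_CANONICAL.setdefault(_a.upper(), _canonical)
--
-- def canonicalize_toolkits(slugs: list[str]) -> list[str]:
--     return list(dict.fromkeys(
--         _ALIAS_TO_CANONICAL.get(s.upper(), s.upper()) for s in slugs))
-- ===== Notes on version B (the rewrite author's own statement) =====
-- stated objective: faster
-- what changed: Replaces the per-slug linear scan of TOOLKIT_SYNONYMS (rebuilding alias sets on every call) with a reverse alias->canonical dict precomputed once with first-wins setdefault, and replaces the explicit seen-set loop with an order-preserving dict.fromkeys dedup of the mapped list.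
import Mathlib
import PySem

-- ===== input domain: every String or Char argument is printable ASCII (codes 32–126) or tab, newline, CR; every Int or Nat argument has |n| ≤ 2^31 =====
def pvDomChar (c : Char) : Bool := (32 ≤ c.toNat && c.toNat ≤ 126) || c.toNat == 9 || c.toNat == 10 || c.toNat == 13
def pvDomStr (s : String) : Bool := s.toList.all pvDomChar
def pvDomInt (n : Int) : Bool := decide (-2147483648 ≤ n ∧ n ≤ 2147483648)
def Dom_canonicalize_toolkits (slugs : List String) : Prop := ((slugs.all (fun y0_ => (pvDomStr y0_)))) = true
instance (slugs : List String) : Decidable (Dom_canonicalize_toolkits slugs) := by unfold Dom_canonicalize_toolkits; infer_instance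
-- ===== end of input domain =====

-- B replaces A's per-slug linear scan of TOOLKIT_SYNONYMS with a reverse alias table
-- built once (first canonical wins) and replaces the seen-set loop with an ordered dedup.

-- ===== PORT A =====
def TOOLKIT_SYNONYMS : List (String × List String) :=
  [ ("GMAIL", ["GMAIL", "GOOGLE_GMAIL"])
  , ("GITHUB", ["GITHUB"])
  , ("GOOGLEDOCS", ["GOOGLEDOCS", "GOOGLE_DOCS", "GOOGLE_DOCUMENTS", "GOOGLE_DOC", "DOCS", "GOOGLE_DRIVE", "GOOGLE"])
  , ("GOOGLE_DOCS", ["GOOGLEDOCS", "GOOGLE_DOCS", "GOOGLE_DOCUMENTS", "GOOGLE_DOC", "DOCS", "GOOGLE_DRIVE", "GOOGLE"])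
  , ("GOOGLECALENDAR", ["GOOGLECALENDAR", "GOOGLE_CALENDAR", "CALENDAR"])
  , ("NOTION", ["NOTION", "NOTIONHQ", "NOTION_DB", "NOTIONDATABASES", "NOTION_DATABASE", "NOTIONDATABASE", "NOTION_PAGES", "NOTIONPAGES"]) ]

-- the 'for canonical, aliases in TOOLKIT_SYNONYMS.items():' loop of canonicalize_toolkit_slug
def slugLoop (up : String) : List (String × List String) → String
  | [] => up
  | (c, as_) :: rest =>
      if up = c ∨ up ∈ PySem.Set.ofList (as_.map PySem.Str.upper) then c
      else slugLoop up rest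

def canonicalize_toolkit_slug (slug : String) : String :=
  slugLoop (PySem.Str.upper slug) TOOLKIT_SYNONYMS

-- the body of A's 'for s in slugs:' loop (state: seen set, result list)
def stepA (st : PySem.Set String × List String) (s : String) : PySem.Set String × List String :=
  let can := canonicalize_toolkit_slug s
  if can ∈ st.1 then st else (PySem.Set.add st.1 can, st.2 ++ [can])

def canonicalize_toolkits (slugs : List String) : List String :=
  (slugs.foldl stepA (PySem.Set.empty, [])).2

-- ===== PORT B =====
-- dict.setdefault(k, v) (return value unused in Source B)
def setdefault (d : PySem.Dict String String) (k v : String) : PySem.Dict String String :=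
  if d.contains k then d else d.insert k v

-- inner 'for _a in [_canonical] + _aliases:' loop of Source B's table build
def addGroup (d : PySem.Dict String String) (p : String × List String) : PySem.Dict String String :=
  (p.1 :: p.2).foldl (fun d a => setdefault d (PySem.Str.upper a) p.1) d

-- Source B's module-level _ALIAS_TO_CANONICAL
def ALIAS_TO_CANONICAL : PySem.Dict String String :=
  TOOLKIT_SYNONYMS.foldl addGroup PySem.Dict.empty

def canonicalize_toolkits_alt (slugs : List String) : List String :=
  PySem.List.dedup (slugs.map (fun s =>
    ALIAS_TO_CANONICAL.getD (PySem.Str.upper s) (PySem.Str.upper s)))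

-- ===== PRECONDITION & SPEC =====
def Spec_canonicalize_toolkits (slugs : List String) (out : List String) : Prop := out = canonicalize_toolkits_alt slugs
instance (slugs : List String) (out : List String) : Decidable (Spec_canonicalize_toolkits slugs out) := by unfold Spec_canonicalize_toolkits; infer_instance

-- ===== CLAIM (what is proved, stated in full; the proofs are below) =====
def Claim_equal_canonicalize_toolkits : Prop := ∀ (slugs : List String), Dom_canonicalize_toolkits slugs → Spec_canonicalize_toolkits slugs (canonicalize_toolkits slugs)

-- ===== LEMMAS AND PROOFS =====

lemma dict_contains_iff (d : PySem.Dict String String) (k : String) :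
    d.contains k ↔ (d.get? k).isSome := by
  simp [PySem.Dict.contains, PySem.Dict.get?, List.any_eq_true, List.find?_isSome]

-- first-match lookup over the synonym groups: the common characterisation of both sides
def specLookup (u : String) : List (String × List String) → Option String
  | [] => none
  | (c, as_) :: rest =>
      if u = c ∨ u ∈ as_.map PySem.Str.upper then some c else specLookup u rest

lemma slugLoop_eq_specLookup (u : String) (syns : List (String × List String)) :
    slugLoop u syns = (specLookup u syns).getD u := by
  induction syns with
  | nil => rfl
  | cons p rest ih =>
      obtain ⟨c, as_⟩ := p
      simp only [slugLoop, specLookup, PySem.Set.mem_ofList]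
      split_ifs with h
      · rfl
      · simpa using ih

lemma get?_foldl_setdefault (ks : List String) (c : String) (d : PySem.Dict String String) (u : String) :
    (ks.foldl (fun d a => setdefault d (PySem.Str.upper a) c) d).get? u
      = (d.get? u).or (if u ∈ ks.map PySem.Str.upper then some c else none) := by
  induction ks generalizing d with
  | nil => simp
  | cons k ks ih =>
      rw [List.foldl_cons, ih]
      by_cases hc : d.contains (PySem.Str.upper k)
      · have hd : setdefault d (PySem.Str.upper k) c = d := by simp [setdefault, hc]
        rw [hd]
        by_cases hk : u = PySem.Str.upper k
        · subst hk
          obtain ⟨v, hv⟩ := Option.isSome_iff_exists.mp ((dict_contains_iff d _).mp hc)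
          simp [hv]
        · simp [List.mem_cons, hk]
      · have hd : setdefault d (PySem.Str.upper k) c = d.insert (PySem.Str.upper k) c := by
          simp [setdefault, hc]
        rw [hd]
        by_cases hk : u = PySem.Str.upper k
        · subst hk
          have h1 : d.get? (PySem.Str.upper k) = none := by
            cases hget : d.get? (PySem.Str.upper k) with
            | none => rfl
            | some v => exact absurd ((dict_contains_iff d _).mpr (by simp [hget])) hc
          rw [PySem.Dict.get?_insert_self]
          simp [h1]
        · rw [PySem.Dict.get?_insert_of_ne _ _ hk]
          simp [List.mem_cons, hk]

lemma get?_build (syns : List (String × List String)) (d : PySem.Dict String String) (u : String)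
    (h : ∀ p ∈ syns, PySem.Str.upper p.1 = p.1) :
    (syns.foldl addGroup d).get? u = (d.get? u).or (specLookup u syns) := by
  induction syns generalizing d with
  | nil => simp [specLookup]
  | cons p rest ih =>
      obtain ⟨c, as_⟩ := p
      have hc : PySem.Str.upper c = c := h (c, as_) (by simp)
      rw [List.foldl_cons, ih _ (fun q hq => h q (by simp [hq]))]
      simp only [addGroup]
      rw [get?_foldl_setdefault]
      simp only [specLookup, List.map_cons, hc, List.mem_cons, Option.or_assoc]
      congr 1
      split_ifs <;> simp

lemma slug_eq_tableLookup (s : String) :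
    canonicalize_toolkit_slug s
      = ALIAS_TO_CANONICAL.getD (PySem.Str.upper s) (PySem.Str.upper s) := by
  have hup : ∀ p ∈ TOOLKIT_SYNONYMS, PySem.Str.upper p.1 = p.1 := by decide
  have hg : ALIAS_TO_CANONICAL.get? (PySem.Str.upper s)
      = specLookup (PySem.Str.upper s) TOOLKIT_SYNONYMS := by
    rw [ALIAS_TO_CANONICAL, get?_build _ _ _ hup]
    simp [PySem.Dict.empty, PySem.Dict.get?]
  rw [canonicalize_toolkit_slug, slugLoop_eq_specLookup]
  simp [PySem.Dict.getD, hg]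

-- order-preserving dedup of ys, skipping elements already in seen
def dedupExcl (seen : List String) : List String → List String
  | [] => []
  | y :: ys => if y ∈ seen then dedupExcl seen ys else y :: dedupExcl (seen ++ [y]) ys

lemma foldl_add_eq_append (ys : List String) (seen : List String) :
    ys.foldl PySem.Set.add seen = seen ++ dedupExcl seen ys := by
  induction ys generalizing seen with
  | nil => simp [dedupExcl]
  | cons y ys ih =>
      rw [List.foldl_cons]
      by_cases hy : y ∈ seen
      · have hadd : PySem.Set.add seen y = seen := by simp [PySem.Set.add, hy]
        rw [hadd, ih]
        simp [dedupExcl, hy]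
      · have hadd : PySem.Set.add seen y = seen ++ [y] := by simp [PySem.Set.add, hy]
        rw [hadd, ih]
        simp [dedupExcl, hy]

lemma foldA (xs : List String) (seen res : List String) :
    (xs.foldl stepA (seen, res)).2
      = res ++ dedupExcl seen (xs.map canonicalize_toolkit_slug) := by
  induction xs generalizing seen res with
  | nil => simp [dedupExcl]
  | cons x xs ih =>
      rw [List.foldl_cons, List.map_cons]
      by_cases hx : canonicalize_toolkit_slug x ∈ seen
      · have hs : stepA (seen, res) x = (seen, res) := by simp [stepA, hx]
        rw [hs, ih]
        simp [dedupExcl, hx]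
      · have hs : stepA (seen, res) x
            = (seen ++ [canonicalize_toolkit_slug x], res ++ [canonicalize_toolkit_slug x]) := by
          simp [stepA, hx, PySem.Set.add]
        rw [hs, ih]
        simp [dedupExcl, hx]

-- ===== VERDICT (by name: the statement is the Claim_ definition above) =====
theorem canonicalize_toolkits_spec : Claim_equal_canonicalize_toolkits := by
  intro slugs _
  unfold Spec_canonicalize_toolkits
  rw [canonicalize_toolkits, canonicalize_toolkits_alt, foldA]
  have hmap : slugs.map (fun s => ALIAS_TO_CANONICAL.getD (PySem.Str.upper s) (PySem.Str.upper s))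
      = slugs.map canonicalize_toolkit_slug :=
    List.map_congr_left (fun s _ => (slug_eq_tableLookup s).symm)
  rw [hmap, PySem.List.dedup_eq_ofList, PySem.Set.ofList_eq_foldl, foldl_add_eq_append]
  simp [PySem.Set.empty]
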